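-- pv_equiv track=rewrite | github.com/carterjohndixon/Ti-84-Python-Programs | Simp_Rads_Simple.py | factor_squares
-- ===== SOURCE A (Python) =====
-- def factor_squares(n):
--     if n <= 0:
--         return 1, abs(n)
--
--     factors = []
--     d = 2
--     temp = n
--
--     while d * d <= temp:
--         while temp % d == 0:
--             factors.append(d)
--             temp //= d
--         d += 1
--
--     if temp > 1:
--         factors.append(temp)
--
--     factor_count = {}
--     for f in factors:
--         factor_count[f] = factor_count.get(f, 0) + 1
--
--     perfect_square = 1
--     remaining = 1
--
--     for factor, count in factor_count.items():
--         pairs = count // 2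
--         perfect_square *= factor ** pairs
--         remaining *= factor ** (count % 2)
--
--     return perfect_square, remaining
-- ===== SOURCE B (Python) =====
-- def factor_squares(n):
--     if n <= 0:
--         return 1, abs(n)
--     best = 1
--     s = 1
--     while s * s <= n:
--         if n % (s * s) == 0:
--             best = s
--         s += 1
--     return best, n // (best * best)
-- ===== Notes on version B (the rewrite author's own statement) =====
-- stated objective: simpler
-- what changed: Replaces trial-division prime factorization plus a count dictionary and per-prime pairing by a single direct scan for the largest s with s*s dividing n, returning (s, n // (s*s)).
import Mathlib
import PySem

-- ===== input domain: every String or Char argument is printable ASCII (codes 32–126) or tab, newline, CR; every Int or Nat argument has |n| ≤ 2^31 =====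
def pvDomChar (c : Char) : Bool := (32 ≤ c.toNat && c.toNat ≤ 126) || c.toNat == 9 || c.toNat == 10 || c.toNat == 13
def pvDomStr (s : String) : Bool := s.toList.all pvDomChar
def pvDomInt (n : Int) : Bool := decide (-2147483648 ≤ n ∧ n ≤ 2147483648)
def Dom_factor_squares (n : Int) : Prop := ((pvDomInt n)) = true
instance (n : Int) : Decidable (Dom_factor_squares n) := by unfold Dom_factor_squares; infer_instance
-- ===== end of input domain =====

-- B replaces A's trial-division factorization + count dictionary by a direct single-loop
-- search for the largest s with s*s dividing n (objective: simpler).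

-- ===== PORT A =====
-- inner `while temp % d == 0` loop of A: appends d and divides temp by d.
-- (The `2 ≤ d ∧ 0 < temp` conjuncts only make the recursion total; on A's actual
-- calls d ≥ 2 and temp ≥ 1 always hold, so the guard is exactly `temp % d == 0`.)
def innerA (d temp : Nat) (acc : List Nat) : List Nat × Nat :=
  if h : 2 ≤ d ∧ 0 < temp ∧ temp % d = 0 then
    innerA d (temp / d) (acc ++ [d])
  else (acc, temp)
termination_by temp
decreasing_by exact Nat.div_lt_self h.2.1 (by omega)

-- needed by outerA's termination proof, hence placed above the claim block
theorem innerA_snd_le (d temp : Nat) (acc : List Nat) : (innerA d temp acc).2 ≤ temp := by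
  fun_induction innerA with
  | case1 temp acc h ih => exact le_trans ih (Nat.div_le_self _ _)
  | case2 => simp

-- outer `while d * d <= temp` loop of A
def outerA (d temp : Nat) (acc : List Nat) : List Nat × Nat :=
  if h : d * d ≤ temp then
    outerA (d + 1) (innerA d temp acc).2 (innerA d temp acc).1
  else (acc, temp)
termination_by temp + 2 - d
decreasing_by
  have := innerA_snd_le d temp acc
  have hd : d ≤ temp := by nlinarith
  omega

def factor_squares (n : Int) : Int × Int :=
  if n ≤ 0 then (1, |n|)
  else
    let r := outerA 2 n.toNat []
    let factors := if 1 < r.2 then r.1 ++ [r.2] else r.1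
    let fc : PySem.Dict Nat Int :=
      factors.foldl (fun d f => d.insert f (d.getD f 0 + 1)) PySem.Dict.empty
    let res := fc.items.foldl
      (fun (pr : Int × Int) kv =>
        (pr.1 * (kv.1 : Int) ^ (PySem.Int.floordiv kv.2 2).toNat,
         pr.2 * (kv.1 : Int) ^ (PySem.Int.mod kv.2 2).toNat))
      (1, 1)
    res

-- ===== PORT B =====
-- `while s * s <= n: if n % (s * s) == 0: best = s; s += 1`
def upB (N s best : Nat) : Nat :=
  if h : s * s ≤ N then
    upB N (s + 1) (if N % (s * s) = 0 then s else best)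
  else best
termination_by N + 1 - s
decreasing_by
  rcases Nat.eq_zero_or_pos s with h0 | h1
  · omega
  · have hs : s ≤ N := le_trans (Nat.le_mul_of_pos_left s h1) h
    omega

def factor_squares_alt (n : Int) : Int × Int :=
  if n ≤ 0 then (1, |n|)
  else
    let best := upB n.toNat 1 1
    ((best : Int), ((n.toNat / (best * best) : Nat) : Int))

-- ===== PRECONDITION & SPEC =====
def Spec_factor_squares (n : Int) (out : Int × Int) : Prop := out = factor_squares_alt n
instance (n : Int) (out : Int × Int) : Decidable (Spec_factor_squares n out) := by unfold Spec_factor_squares; infer_instance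

-- ===== CLAIM (what is proved, stated in full; the proofs are below) =====
def Claim_equal_factor_squares : Prop := ∀ (n : Int), Dom_factor_squares n → Spec_factor_squares n (factor_squares n)

-- ===== LEMMAS AND PROOFS =====

theorem innerA_spec (d temp : Nat) (acc : List Nat) :
    (innerA d temp acc).2 ∣ temp ∧
    (innerA d temp acc).1.prod * (innerA d temp acc).2 = acc.prod * temp ∧
    (∀ x ∈ (innerA d temp acc).1, x ∈ acc ∨ (x = d ∧ d ∣ temp)) ∧
    (0 < temp → 0 < (innerA d temp acc).2) ∧
    (2 ≤ d → 0 < temp → ¬ d ∣ (innerA d temp acc).2) := by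
  fun_induction innerA with
  | case1 temp acc h ih =>
    obtain ⟨hd, ht, hmod⟩ := h
    have hdd : d ∣ temp := Nat.dvd_of_mod_eq_zero hmod
    have hdiv : 0 < temp / d := Nat.div_pos (Nat.le_of_dvd ht hdd) (by omega)
    refine ⟨ih.1.trans (Nat.div_dvd_of_dvd hdd), ?_, ?_, fun _ => ih.2.2.2.1 hdiv,
      fun h2 _ => ih.2.2.2.2 h2 hdiv⟩
    · rw [ih.2.1]
      simp only [List.prod_append, List.prod_cons, List.prod_nil, mul_one]
      rw [mul_assoc, Nat.mul_div_cancel' hdd]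
    · intro x hx
      rcases ih.2.2.1 x hx with hmem | ⟨hxd, _⟩
      · rcases List.mem_append.mp hmem with h1 | h1
        · exact Or.inl h1
        · exact Or.inr ⟨by simpa using h1, hdd⟩
      · exact Or.inr ⟨hxd, hdd⟩
  | case2 temp acc h =>
    refine ⟨dvd_refl _, rfl, fun x hx => Or.inl hx, fun h => h, fun h2 h0 hdvd => ?_⟩
    exact h ⟨h2, h0, Nat.dvd_iff_mod_eq_zero.mp hdvd⟩

theorem outerA_spec (d temp : Nat) (acc : List Nat) :
    2 ≤ d → 0 < temp →
    (∀ e, 2 ≤ e → e < d → ¬ e ∣ temp) →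
    (∀ x ∈ acc, Nat.Prime x) →
    (outerA d temp acc).1.prod * (outerA d temp acc).2 = acc.prod * temp ∧
    (∀ x ∈ (outerA d temp acc).1, Nat.Prime x) ∧
    0 < (outerA d temp acc).2 ∧
    ((outerA d temp acc).2 = 1 ∨ Nat.Prime (outerA d temp acc).2) := by
  fun_induction outerA with
  | case1 d temp acc h ih =>
    intro hd ht hsmall hacc
    obtain ⟨hI1, hI2, hI3, hI4, hI5⟩ := innerA_spec d temp acc
    have ht' : 0 < (innerA d temp acc).2 := hI4 ht
    have hsmall' : ∀ e, 2 ≤ e → e < d + 1 → ¬ e ∣ (innerA d temp acc).2 := by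
      intro e he hlt hdvd
      rcases Nat.lt_succ_iff_lt_or_eq.mp hlt with h1 | h1
      · exact hsmall e he h1 (hdvd.trans hI1)
      · exact hI5 hd ht (h1 ▸ hdvd)
    have hdprime : d ∣ temp → Nat.Prime d := by
      intro hdt
      rw [Nat.prime_def_lt]
      refine ⟨hd, fun m hm hmd => ?_⟩
      by_contra hm1
      have hm2 : 2 ≤ m := by
        rcases Nat.lt_or_ge m 2 with h2 | h2
        · interval_cases m
          · simp at hmd; omega
          · omega
        · exact h2
      exact hsmall m hm2 hm (hmd.trans hdt)
    have hacc' : ∀ x ∈ (innerA d temp acc).1, Nat.Prime x := by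
      intro x hx
      rcases hI3 x hx with h1 | ⟨h1, h2⟩
      · exact hacc x h1
      · exact h1 ▸ hdprime h2
    obtain ⟨c1, c2, c3, c4⟩ := ih (by omega) ht' hsmall' hacc'
    refine ⟨?_, c2, c3, c4⟩
    rw [c1, hI2]
  | case2 d temp acc h =>
    intro hd ht hsmall hacc
    refine ⟨rfl, hacc, ht, ?_⟩
    rcases Nat.lt_or_ge temp 2 with h1 | h1
    · left; omega
    · right
      rw [Nat.prime_def_le_sqrt]
      refine ⟨h1, fun m hm hms => ?_⟩
      have hmd : m < d := by
        have h2 : m * m ≤ temp := Nat.le_sqrt.mp hms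
        nlinarith [Nat.not_le.mp h]
      exact hsmall m hm hmd

theorem upB_dvd (N : Nat) (hN : 0 < N) (s best : Nat) :
    0 < best → best * best ∣ N → 0 < upB N s best ∧ (upB N s best) * (upB N s best) ∣ N := by
  fun_induction upB with
  | case1 s best h ih =>
    intro hb hd
    by_cases hm : N % (s * s) = 0
    · have hsd : s * s ∣ N := Nat.dvd_of_mod_eq_zero hm
      have hs : 0 < s := by
        rcases Nat.eq_zero_or_pos s with h0 | h0
        · subst h0; simp at hsd; omega
        · exact h0
      simp only [hm, if_true, dif_pos hm] at ih ⊢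
      exact ih hs hsd
    · simp only [hm, if_false, dif_neg hm] at ih ⊢
      exact ih hb hd
  | case2 s best h => exact fun hb hd => ⟨hb, hd⟩

theorem upB_ge (N : Nat) (hN : 0 < N) (k : Nat) (hk : k * k ∣ N) (s best : Nat) :
    (k < s → k ≤ best) → k ≤ upB N s best := by
  fun_induction upB with
  | case1 s best h ih =>
    intro hinv
    apply ih
    intro hks
    by_cases hm : N % (s * s) = 0
    · simp only [if_pos hm, dif_pos hm]
      omega
    · simp only [if_neg hm, dif_neg hm]
      rcases Nat.lt_succ_iff_lt_or_eq.mp hks with h1 | h1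
      · exact hinv h1
      · exact absurd (Nat.dvd_iff_mod_eq_zero.mp (h1 ▸ hk)) hm
  | case2 s best h =>
    intro hinv
    apply hinv
    have h2 : k * k ≤ N := Nat.le_of_dvd hN hk
    by_contra hks
    push_neg at hks
    exact absurd (Nat.mul_le_mul hks hks) (by omega)

-- a number s with s² ∣ P²·R, R squarefree, divides P
theorem sq_dvd_of_squarefree (P R s : Nat) (hP : 0 < P) (hR : Squarefree R)
    (h : s * s ∣ P * P * R) : s ∣ P := by
  have hR0 : R ≠ 0 := by rintro rfl; exact not_squarefree_zero hR
  have hN0 : P * P * R ≠ 0 := by positivity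
  have hs0 : s ≠ 0 := by
    rintro rfl
    simp only [Nat.zero_mul, Nat.zero_dvd] at h
    exact hN0 h
  rw [← Nat.factorization_le_iff_dvd hs0 hP.ne']
  intro p
  have hf := (Nat.factorization_le_iff_dvd (by positivity) hN0).mpr h p
  rw [Nat.factorization_mul hs0 hs0] at hf
  rw [Nat.factorization_mul (by positivity) hR0, Nat.factorization_mul hP.ne' hP.ne'] at hf
  have hle1 := Squarefree.natFactorization_le_one p hR
  simp only [Finsupp.add_apply] at hf
  omega

-- fold of a pair of running products
theorem foldl_pair_mul {α : Type} (g h : α → Int) (l : List α) (a b : Int) :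
    l.foldl (fun pr x => (pr.1 * g x, pr.2 * h x)) (a, b)
      = (a * (l.map g).prod, b * (l.map h).prod) := by
  induction l generalizing a b with
  | nil => simp
  | cons x xs ih => simp [ih, mul_assoc]

-- product of a nodup list of primes is squarefree
theorem squarefree_prod_primes (l : List Nat) (hnd : l.Nodup)
    (hp : ∀ x ∈ l, Nat.Prime x) : Squarefree l.prod := by
  induction l with
  | nil => simpa using squarefree_one
  | cons x xs ih =>
    simp only [List.prod_cons]
    have hx : Nat.Prime x := hp x (by simp)
    have hxs : ∀ y ∈ xs, Nat.Prime y := fun y hy => hp y (by simp [hy])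
    have hcop : Nat.Coprime x xs.prod := by
      rw [Nat.Prime.coprime_iff_not_dvd hx]
      intro hdvd
      obtain ⟨a, ha, hxa⟩ := (Prime.dvd_prod_iff hx.prime).mp hdvd
      have := (Nat.prime_dvd_prime_iff_eq hx (hxs a ha)).mp hxa
      exact (List.nodup_cons.mp hnd).1 (this ▸ ha)
    rw [Nat.squarefree_mul hcop]
    exact ⟨hx.squarefree, ih (List.nodup_cons.mp hnd).2 hxs⟩

theorem map_prod_dvd (l : List Nat) (g : Nat → Nat) (hg : ∀ x ∈ l, g x ∣ x) :
    (l.map g).prod ∣ l.prod := by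
  induction l with
  | nil => simp
  | cons x xs ih =>
    simp only [List.map_cons, List.prod_cons]
    exact mul_dvd_mul (hg x (by simp)) (ih (fun y hy => hg y (by simp [hy])))

theorem int_div2_toNat (c : Nat) : ((c : Int) / 2).toNat = c / 2 := by omega

theorem int_mod2_toNat (c : Nat) : ((c : Int) % 2).toNat = c % 2 := by omega

-- ===== VERDICT (by name: the statement is the Claim_ definition above) =====
theorem factor_squares_spec : Claim_equal_factor_squares := by
  intro n _
  unfold Spec_factor_squares
  by_cases hn : n ≤ 0
  · simp [factor_squares, factor_squares_alt, hn]
  · simp only [factor_squares, factor_squares_alt, if_neg hn]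
    set N := n.toNat with hNdef
    have hN : 0 < N := by omega
    -- A side: the factor list
    obtain ⟨c1, c2, c3, c4⟩ := outerA_spec 2 N []
      (le_refl 2) hN (fun e he hlt => by omega) (by simp)
    set r := outerA 2 N [] with hr
    set factors := if 1 < r.2 then r.1 ++ [r.2] else r.1 with hfdef
    have hfprod : factors.prod = N := by
      rw [hfdef]
      split_ifs with h12
      · simpa using c1
      · have h1 : r.2 = 1 := by omega
        simpa [h1] using c1
    have hfp : ∀ x ∈ factors, Nat.Prime x := by
      intro x hx
      rw [hfdef] at hx
      split_ifs at hx with h12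
      · rcases List.mem_append.mp hx with h1 | h1
        · exact c2 x h1
        · have : x = r.2 := by simpa using h1
          rcases c4 with h2 | h2
          · omega
          · exact this ▸ h2
      · exact c2 x hx
    -- the counter dictionary and the final folds
    rw [PySem.Dict.foldl_insert_getD_add_one_eq_counter, PySem.Dict.items_counter]
    rw [List.foldl_map, show (1, 1) = ((1 : Int), (1 : Int)) from rfl]
    have hfold := foldl_pair_mul (α := Nat)
      (fun f => (f : Int) ^ (PySem.Int.floordiv ((factors.count f : Int)) 2).toNat)
      (fun f => (f : Int) ^ (PySem.Int.mod ((factors.count f : Int)) 2).toNat)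
      (PySem.Set.ofList factors) 1 1
    simp only at hfold ⊢
    rw [hfold]
    set S : List Nat := PySem.Set.ofList factors with hSdef
    have hSnd : S.Nodup := PySem.Set.nodup_ofList factors
    have hSp : ∀ x ∈ S, Nat.Prime x := fun x hx =>
      hfp x ((PySem.Set.mem_ofList factors x).mp hx)
    -- rewrite the Int maps as casts of Nat maps
    have hmap1 : (S.map (fun f : Nat => (f : Int) ^ (PySem.Int.floordiv ((factors.count f : Int)) 2).toNat)).prod
        = ((S.map (fun f => f ^ (factors.count f / 2))).prod : Int) := by
      rw [Nat.cast_list_prod, List.map_map]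
      apply congrArg
      apply List.map_congr_left
      intro f _
      simp [int_div2_toNat, Function.comp]
    have hmap2 : (S.map (fun f : Nat => (f : Int) ^ (PySem.Int.mod ((factors.count f : Int)) 2).toNat)).prod
        = ((S.map (fun f => f ^ (factors.count f % 2))).prod : Int) := by
      rw [Nat.cast_list_prod, List.map_map]
      apply congrArg
      apply List.map_congr_left
      intro f _
      simp [int_mod2_toNat, Function.comp]
    rw [hmap1, hmap2]
    set P : Nat := (S.map (fun f => f ^ (factors.count f / 2))).prod with hPdef
    set R : Nat := (S.map (fun f => f ^ (factors.count f % 2))).prod with hRdef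
    -- P² · R = N
    have hPPR : P * P * R = N := by
      rw [hPdef, hRdef, ← hfprod]
      rw [← List.prod_map_mul, ← List.prod_map_mul]
      have : (S.map (fun f => f ^ (factors.count f / 2) * f ^ (factors.count f / 2)
          * f ^ (factors.count f % 2))).prod
          = (S.map (fun f => f ^ factors.count f)).prod := by
        congr 1
        apply List.map_congr_left
        intro f _
        rw [← pow_add, ← pow_add]
        congr 1
        omega
      rw [this]
      rw [← List.prod_toFinset _ hSnd]
      have hfin : S.toFinset = factors.toFinset := by
        ext x
        simp [hSdef, PySem.Set.mem_ofList]
      rw [hfin, ← Finset.prod_list_count]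
    have hP0 : 0 < P := by
      rw [hPdef]
      apply List.prod_pos
      intro x hx
      obtain ⟨f, hf, rfl⟩ := List.mem_map.mp hx
      exact pow_pos (hSp f hf).pos _
    have hRsf : Squarefree R := by
      have hdvd : R ∣ S.prod := by
        rw [hRdef]
        apply map_prod_dvd
        intro x hx
        have h01 : factors.count x % 2 = 0 ∨ factors.count x % 2 = 1 := by omega
        rcases h01 with h | h <;> simp [h]
      exact Squarefree.squarefree_of_dvd hdvd (squarefree_prod_primes S hSnd hSp)
    -- B side
    have hub := upB_dvd N hN 1 1 one_pos (by simpa using one_dvd N)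
    have hple : P ≤ upB N 1 1 :=
      upB_ge N hN P ⟨R, hPPR.symm ▸ rfl⟩ 1 1 (fun h => by omega)
    have hbdvd : upB N 1 1 ∣ P :=
      sq_dvd_of_squarefree P R (upB N 1 1) hP0 hRsf (hPPR ▸ hub.2)
    have hbP : upB N 1 1 = P := le_antisymm (Nat.le_of_dvd hP0 hbdvd) hple
    have hRN : R = N / (P * P) := by
      rw [← hPPR, Nat.mul_div_cancel_left _ (Nat.mul_pos hP0 hP0)]
    rw [hbP, hRN]
    simp
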